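-- pv_equiv track=rewrite | github.com/jeastman/ecl-agent | apps/tui/local_agent_tui/store/selectors.py | _matches_command_query
-- ===== SOURCE A (Python) =====
-- def _matches_command_query(query: str, haystack: str) -> bool:
--     if query in haystack:
--         return True
--     index = 0
--     for char in query:
--         index = haystack.find(char, index)
--         if index == -1:
--             return False
--         index += 1
--     return True
-- ===== SOURCE B (Python) =====
-- def _matches_command_query(query: str, haystack: str) -> bool:
--     # Inverted index: each character of haystack -> sorted list of its positions.
--     positions = {}
--     for i, ch in enumerate(haystack):
--         positions.setdefault(ch, []).append(i)
--     index = 0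
--     for c in query:
--         lst = positions.get(c)
--         if lst is None:
--             return False
--         # binary search: first position in lst that is >= index (bisect_left)
--         lo, hi = 0, len(lst)
--         while lo < hi:
--             mid = (lo + hi) // 2
--             if lst[mid] < index:
--                 lo = mid + 1
--             else:
--                 hi = mid
--         if lo == len(lst):
--             return False
--         index = lst[lo] + 1
--     return True
-- ===== Notes on version B (the rewrite author's own statement) =====
-- stated objective: alternative
-- what changed: Replaces the forward scan with repeated haystack.find(char, index) (plus a redundant substring fast-path) by a different data structure: a precomputed inverted index mapping each haystack character to its sorted position list, queried per query character with a hand-written binary search for the first position >= the cursor.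
import Mathlib
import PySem

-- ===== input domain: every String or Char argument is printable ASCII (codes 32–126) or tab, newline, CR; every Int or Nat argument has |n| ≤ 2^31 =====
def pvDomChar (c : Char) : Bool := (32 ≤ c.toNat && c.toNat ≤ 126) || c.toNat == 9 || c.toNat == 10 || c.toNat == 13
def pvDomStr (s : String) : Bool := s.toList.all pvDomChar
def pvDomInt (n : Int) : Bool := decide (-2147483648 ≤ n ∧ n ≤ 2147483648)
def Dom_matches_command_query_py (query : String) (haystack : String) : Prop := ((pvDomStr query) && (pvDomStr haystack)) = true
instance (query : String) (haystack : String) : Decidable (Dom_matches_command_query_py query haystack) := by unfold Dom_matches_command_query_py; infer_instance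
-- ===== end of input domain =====

-- B replaces A's find-with-cursor scan (and its redundant substring fast-path) by an inverted
-- index char -> sorted positions built once, queried by binary search; same results, different data structure.

-- ===== PORT A =====
-- the for-loop of A: state is the integer index; haystack.find(char, index) via PySem.Chars.findFrom
def loopA_matches (hs : List Char) : List Char → Int → Bool
  | [], _ => true
  | c :: q, index =>
    let index' := PySem.Chars.findFrom hs [c] index
    if index' = -1 then false else loopA_matches hs q (index' + 1)

def matches_command_query_py (query : String) (haystack : String) : Bool :=
  if PySem.Str.isIn query haystack then true
  else loopA_matches haystack.toList query.toList 0

-- ===== PORT B =====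
-- positions.setdefault(ch, []).append(i), folded over enumerate(haystack)
def idxStep (d : PySem.Dict Char (List Int)) (p : Int × Char) : PySem.Dict Char (List Int) :=
  d.insert p.2 (d.getD p.2 [] ++ [p.1])

def buildIndex (hs : List Char) : PySem.Dict Char (List Int) :=
  (PySem.List.enumerate hs).foldl idxStep PySem.Dict.empty

-- Source B's hand-written while loop; lo/hi are always naturals 0 ≤ lo ≤ hi ≤ len(lst) in Python,
-- so Nat cursors and Nat division are exact for (lo + hi) // 2; lst[mid] is always in range
-- (lo ≤ mid < hi ≤ len), so getD's default is never read.
def bsearch (lst : List Int) (x : Int) (lo hi : Nat) : Nat :=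
  if lo < hi then
    let mid := (lo + hi) / 2
    if lst.getD mid 0 < x then bsearch lst x (mid + 1) hi else bsearch lst x lo mid
  else lo
termination_by hi - lo
decreasing_by all_goals omega

-- the for-loop over query: positions.get(c), binary search, advance the cursor
def loopB_matches (d : PySem.Dict Char (List Int)) : List Char → Int → Bool
  | [], _ => true
  | c :: rest, index =>
    match d.get? c with
    | none => false
    | some lst =>
      let lo := bsearch lst index 0 lst.length
      if lo = lst.length then false
      else loopB_matches d rest (lst.getD lo 0 + 1)

def matches_command_query_py_alt (query : String) (haystack : String) : Bool :=
  loopB_matches (buildIndex haystack.toList) query.toList 0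

-- ===== PRECONDITION & SPEC =====
def Spec_matches_command_query_py (query : String) (haystack : String) (out : Bool) : Prop := out = matches_command_query_py_alt query haystack
instance (query : String) (haystack : String) (out : Bool) : Decidable (Spec_matches_command_query_py query haystack out) := by unfold Spec_matches_command_query_py; infer_instance

-- ===== CLAIM (what is proved, stated in full; the proofs are below) =====
def Claim_equal_matches_command_query_py : Prop := ∀ (query : String) (haystack : String), Dom_matches_command_query_py query haystack → Spec_matches_command_query_py query haystack (matches_command_query_py query haystack)

-- ===== LEMMAS AND PROOFS =====

-- ---- generic helpers about singleton patterns (shared by both sides) ----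
theorem singleton_prefix_iff_head {c : Char} {m : List Char} :
    [c] <+: m ↔ m.head? = some c := by
  cases m with
  | nil => simp
  | cons a t => simp [List.cons_prefix_cons, eq_comm]

theorem singleton_infix_iff_mem {c : Char} {l : List Char} :
    [c] <:+: l ↔ c ∈ l := by
  constructor
  · intro h
    exact h.sublist.mem (by simp)
  · intro h
    obtain ⟨s, t, rfl⟩ := List.append_of_mem h
    exact ⟨s, t, by simp⟩

-- ---- A-side: the fast path is subsumed by the subsequence loop ----
def consume_matches : List Char → List Char → Bool
  | [], _ => true
  | c :: q, h =>
    match h.dropWhile (· != c) with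
    | [] => false
    | _ :: rest => consume_matches q rest

theorem dropWhile_ne_eq_drop {c : Char} {l : List Char} {j : ℕ}
    (hhead : (l.drop j).head? = some c)
    (hmin : ∀ i < j, l[i]? ≠ some c) :
    l.dropWhile (· != c) = l.drop j := by
  induction l generalizing j with
  | nil => simp at hhead
  | cons a t ih =>
    cases j with
    | zero =>
      simp at hhead
      subst hhead
      simp [List.dropWhile]
    | succ j' =>
      have ha : a ≠ c := by
        have := hmin 0 (Nat.succ_pos _)
        simpa using this
      have : t.dropWhile (· != c) = t.drop j' := by
        apply ih
        · simpa using hhead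
        · intro i hi
          have := hmin (i + 1) (Nat.succ_lt_succ hi)
          simpa using this
      have hb : (a != c) = true := by simp [ha]
      simp [List.dropWhile, hb, this]

theorem loopA_eq_consume (hs : List Char) (q : List Char) (k : ℕ) (hk : k ≤ hs.length) :
    loopA_matches hs q (↑k) = consume_matches q (hs.drop k) := by
  induction q generalizing k with
  | nil => simp [loopA_matches, consume_matches]
  | cons c q ih =>
    by_cases hneg : PySem.Chars.findFrom hs [c] (↑k) = -1
    · have hnotin : ¬ [c] <:+: hs.drop k :=
        (PySem.Chars.findFrom_natCast_eq_neg_one_iff hs [c] k hk).mp hneg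
      have hnomem : c ∉ hs.drop k := fun h => hnotin (singleton_infix_iff_mem.mpr h)
      have hdw : (hs.drop k).dropWhile (· != c) = [] := by
        rw [List.dropWhile_eq_nil_iff]
        intro x hx
        simp only [bne_iff_ne, ne_eq]
        rintro rfl
        exact hnomem hx
      simp [loopA_matches, consume_matches, hneg, hdw]
    · obtain ⟨hge, hpre, hmin⟩ := PySem.Chars.findFrom_natCast_spec hs [c] k hk hneg
      set f := PySem.Chars.findFrom hs [c] (↑k) with hf
      have hf0 : 0 ≤ f := le_trans (by positivity) hge
      have hfnat : f = ↑f.toNat := (Int.toNat_of_nonneg hf0).symm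
      have hklef : k ≤ f.toNat := by omega
      have hhead : (hs.drop f.toNat).head? = some c := singleton_prefix_iff_head.mp hpre
      have hlt : f.toNat < hs.length := by
        by_contra hge2
        have : hs.drop f.toNat = [] := List.drop_eq_nil_of_le (by omega)
        rw [this] at hhead
        simp at hhead
      have hdw : (hs.drop k).dropWhile (· != c) = hs.drop f.toNat := by
        have := dropWhile_ne_eq_drop (c := c) (l := hs.drop k) (j := f.toNat - k)
          (by rwa [List.drop_drop, Nat.add_sub_cancel' hklef])
          (fun i hi => by
            rw [List.getElem?_drop, ← List.head?_drop]
            intro hc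
            exact hmin (k + i) (Nat.le_add_right _ _) (by omega)
              (singleton_prefix_iff_head.mpr hc))
        rwa [List.drop_drop, Nat.add_sub_cancel' hklef] at this
      obtain ⟨d, rest, hdr⟩ : ∃ d rest, hs.drop f.toNat = d :: rest := by
        cases h : hs.drop f.toNat with
        | nil => rw [h] at hhead; simp at hhead
        | cons d rest => exact ⟨d, rest, rfl⟩
      have hrest : rest = hs.drop (f.toNat + 1) := by
        have := congrArg (List.drop 1) hdr
        rwa [List.drop_drop, List.drop_one, List.tail_cons, eq_comm] at this
      have hfp1 : f + 1 = ((f.toNat + 1 : ℕ) : Int) := by omega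
      have := ih (f.toNat + 1) (by omega)
      simp only [loopA_matches, consume_matches, ← hf, hdw, hdr, hfp1, if_neg hneg]
      rw [this, ← hrest]

theorem consume_of_sublist {q h : List Char} (hsub : q.Sublist h) :
    consume_matches q h = true := by
  induction h generalizing q with
  | nil =>
    have : q = [] := List.sublist_nil.mp hsub
    subst this
    rfl
  | cons a h' ih =>
    cases q with
    | nil => rfl
    | cons c q' =>
      by_cases hac : c = a
      · subst hac
        have hq' : q'.Sublist h' := by
          cases hsub with
          | cons _ hs => exact (List.sublist_cons_self c q').trans hs
          | cons₂ _ hs => exact hs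
        simp [consume_matches, List.dropWhile]
        exact ih hq'
      · have hs' : (c :: q').Sublist h' := by
          cases hsub with
          | cons _ hs => exact hs
          | cons₂ _ hs => exact absurd rfl hac
        have : (a != c) = true := by simp [bne_iff_ne]; exact fun h => hac h.symm
        simp only [consume_matches, List.dropWhile, this]
        have := ih hs'
        simpa [consume_matches] using this

-- ---- B-side: characterisation of the inverted index ----
def posList (hs : List Char) (c : Char) : List Int :=
  ((PySem.List.enumerate hs).filter (fun p => p.2 == c)).map Prod.fst

theorem foldl_idxStep_getD (l : List (Int × Char)) (d : PySem.Dict Char (List Int)) (c : Char) :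
    (l.foldl idxStep d).getD c [] = d.getD c [] ++ (l.filter (fun p => p.2 == c)).map Prod.fst := by
  induction l generalizing d with
  | nil => simp
  | cons p t ih =>
    rcases p with ⟨i, ch⟩
    rw [List.foldl_cons, ih, List.filter_cons]
    by_cases h : ch = c
    · subst h
      simp [idxStep]
    · simp [idxStep, PySem.Dict.getD_insert, h, Ne.symm h]

theorem foldl_idxStep_get?_none (l : List (Int × Char)) (d : PySem.Dict Char (List Int)) (c : Char) :
    ((l.foldl idxStep d).get? c = none ↔ d.get? c = none ∧ l.filter (fun p => p.2 == c) = []) := by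
  induction l generalizing d with
  | nil => simp
  | cons p t ih =>
    rcases p with ⟨i, ch⟩
    rw [List.foldl_cons, ih, List.filter_cons]
    by_cases h : ch = c
    · subst h
      simp [idxStep]
    · simp [idxStep, PySem.Dict.get?_insert, h, Ne.symm h]

theorem buildIndex_get? (hs : List Char) (c : Char) :
    (buildIndex hs).get? c = if posList hs c = [] then none else some (posList hs c) := by
  have hgetD := foldl_idxStep_getD (PySem.List.enumerate hs) PySem.Dict.empty c
  have hnone := foldl_idxStep_get?_none (PySem.List.enumerate hs) PySem.Dict.empty c
  have hplist : posList hs c = ((PySem.List.enumerate hs).filter (fun p => p.2 == c)).map Prod.fst := rfl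
  by_cases hemp : posList hs c = []
  · rw [if_pos hemp]
    apply hnone.mpr
    refine ⟨by simp, ?_⟩
    rw [hplist] at hemp
    exact List.map_eq_nil_iff.mp hemp
  · rw [if_neg hemp]
    cases hq : (buildIndex hs).get? c with
    | none =>
      exfalso
      have := (hnone.mp hq).2
      rw [hplist, this] at hemp
      simp at hemp
    | some lst =>
      have hgd : (buildIndex hs).getD c [] = posList hs c := by
        rw [hplist]
        unfold buildIndex
        rw [hgetD]
        simp
      have hgl : (buildIndex hs).getD c [] = lst := by
        simp [PySem.Dict.getD, hq]
      rw [← hgd, hgl]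

theorem mem_posList {hs : List Char} {c : Char} {j : Int} :
    j ∈ posList hs c ↔ ∃ (k : ℕ) (h : k < hs.length), j = (k : Int) ∧ hs[k] = c := by
  unfold posList
  constructor
  · intro hj
    obtain ⟨p, hp, hfst⟩ := List.mem_map.mp hj
    obtain ⟨hmem, hpred⟩ := List.mem_filter.mp hp
    obtain ⟨k, hk, hpk⟩ := (PySem.List.mem_enumerate_iff _ _ _).mp hmem
    refine ⟨k, hk, ?_, ?_⟩
    · rw [← hfst, hpk]; simp
    · have : p.2 = c := by simpa using hpred
      rw [hpk] at this
      simpa using this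
  · rintro ⟨k, hk, rfl, hc⟩
    apply List.mem_map.mpr
    refine ⟨((k : Int), hs[k]), ?_, by simp⟩
    apply List.mem_filter.mpr
    refine ⟨?_, by simp [hc]⟩
    exact (PySem.List.mem_enumerate_iff _ _ _).mpr ⟨k, hk, by simp⟩

theorem posList_pairwise (hs : List Char) (c : Char) :
    (posList hs c).Pairwise (· < ·) := by
  unfold posList
  rw [List.pairwise_map]
  exact List.Pairwise.filter _ (PySem.List.pairwise_lt_enumerate hs 0)

theorem posList_mono {hs : List Char} {c : Char} {i j : ℕ}
    (hi : i < (posList hs c).length) (hj : j < (posList hs c).length) (hij : i ≤ j) :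
    (posList hs c)[i] ≤ (posList hs c)[j] := by
  rcases Nat.lt_or_ge i j with h | h
  · exact le_of_lt ((List.pairwise_iff_getElem.mp (posList_pairwise hs c)) i j hi hj h)
  · have : i = j := le_antisymm hij h
    subst this
    exact le_refl _

-- ---- B-side: the binary search finds the first position ≥ the cursor ----
theorem bsearch_spec (lst : List Int) (x : Int)
    (hmono : ∀ (i j : ℕ) (hi : i < lst.length) (hj : j < lst.length), i ≤ j → lst[i] ≤ lst[j]) :
    ∀ (n lo hi : ℕ), hi - lo = n → lo ≤ hi → hi ≤ lst.length →
    (∀ k, k < lo → (hk : k < lst.length) → lst[k] < x) →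
    (∀ k, hi ≤ k → (hk : k < lst.length) → x ≤ lst[k]) →
    (bsearch lst x lo hi ≤ lst.length) ∧
    (∀ k, k < bsearch lst x lo hi → (hk : k < lst.length) → lst[k] < x) ∧
    (∀ k, bsearch lst x lo hi ≤ k → (hk : k < lst.length) → x ≤ lst[k]) := by
  intro n
  induction n using Nat.strong_induction_on with
  | _ n ih =>
    intro lo hi hn hle hhi h1 h2
    rw [bsearch]
    by_cases hlt : lo < hi
    · rw [if_pos hlt]
      have hmid : (lo + hi) / 2 < lst.length := by omega
      have hgd : lst.getD ((lo + hi) / 2) 0 = lst[(lo + hi) / 2] := List.getD_eq_getElem lst 0 hmid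
      by_cases hcmp : lst.getD ((lo + hi) / 2) 0 < x
      · simp only [hcmp, if_true]
        apply ih (hi - ((lo + hi) / 2 + 1)) (by omega) _ _ rfl (by omega) hhi
        · intro k hk hkl
          rcases Nat.lt_or_ge k ((lo + hi) / 2) with hc | hc
          · calc lst[k] ≤ lst[(lo + hi) / 2] := hmono k _ hkl hmid (le_of_lt hc)
              _ < x := by rwa [hgd] at hcmp
          · have : k = (lo + hi) / 2 := by omega
            subst this
            rwa [hgd] at hcmp
        · exact h2
      · simp only [hcmp, if_false]
        apply ih ((lo + hi) / 2 - lo) (by omega) _ _ rfl (by omega) (by omega) h1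
        intro k hk hkl
        calc x ≤ lst[(lo + hi) / 2] := by rw [← hgd]; omega
          _ ≤ lst[k] := hmono _ k hmid hkl hk
    · rw [if_neg hlt]
      refine ⟨by omega, h1, fun k hk hkl => h2 k (by omega) hkl⟩

-- the bridge: on index lst = posList hs c, the binary search result reproduces haystack.find(c, k)
theorem bsearch_eq_findFrom (hs : List Char) (c : Char) (k : ℕ) (hk : k ≤ hs.length)
    (lst : List Int) (hlst : lst = posList hs c) :
    (bsearch lst (↑k) 0 lst.length = lst.length → PySem.Chars.findFrom hs [c] (↑k) = -1) ∧
    (bsearch lst (↑k) 0 lst.length < lst.length →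
      PySem.Chars.findFrom hs [c] (↑k) = lst.getD (bsearch lst (↑k) 0 lst.length) 0) := by
  subst hlst
  set lst := posList hs c with hlst
  have hmono : ∀ (i j : ℕ) (hi : i < lst.length) (hj : j < lst.length), i ≤ j → lst[i] ≤ lst[j] :=
    fun i j hi hj hij => posList_mono hi hj hij
  obtain ⟨hrle, hinv1, hinv2⟩ := bsearch_spec lst (↑k) hmono (lst.length - 0) 0 lst.length rfl
    (Nat.zero_le _) (le_refl _) (by omega) (fun k hk hkl => absurd hkl (by omega))
  set r := bsearch lst (↑k) 0 lst.length with hr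
  constructor
  · intro hfull
    rw [PySem.Chars.findFrom_natCast_eq_neg_one_iff hs [c] k hk]
    intro hinf
    have hmem : c ∈ hs.drop k := singleton_infix_iff_mem.mp hinf
    obtain ⟨i, hi, hci⟩ := List.mem_iff_getElem.mp hmem
    have hlen : k + i < hs.length := by
      have := hi
      rw [List.length_drop] at this
      omega
    have hget : hs[k + i] = c := by
      rw [← List.getElem_drop]
      exact hci
    have hmemlst : ((k + i : ℕ) : Int) ∈ lst := mem_posList.mpr ⟨k + i, hlen, rfl, hget⟩
    obtain ⟨j, hj, hlj⟩ := List.mem_iff_getElem.mp hmemlst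
    have := hinv1 j (by omega) hj
    rw [hlj] at this
    omega
  · intro hrlt
    have hvpos := hinv2 r (le_refl _) hrlt
    have hvmem : lst[r] ∈ lst := List.getElem_mem hrlt
    obtain ⟨m, hm, hvm, hcm⟩ := mem_posList.mp hvmem
    have hkm : k ≤ m := by rw [hvm] at hvpos; exact_mod_cast hvpos
    -- c occurs in hs.drop k, so findFrom does not return -1
    have hmok : c ∈ hs.drop k := by
      have : (hs.drop k)[m - k]'(by rw [List.length_drop]; omega) = hs[m] := by
        rw [List.getElem_drop]
        congr 1
        omega
      rw [← hcm, ← this]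
      exact List.getElem_mem _
    have hneg : PySem.Chars.findFrom hs [c] (↑k) ≠ -1 := by
      rw [ne_eq, PySem.Chars.findFrom_natCast_eq_neg_one_iff hs [c] k hk]
      simp [singleton_infix_iff_mem, hmok]
    obtain ⟨hge, hpre, hmin⟩ := PySem.Chars.findFrom_natCast_spec hs [c] k hk hneg
    set f := PySem.Chars.findFrom hs [c] (↑k) with hf
    have hf0 : 0 ≤ f := le_trans (by positivity) hge
    have hklef : k ≤ f.toNat := by omega
    have hhead : (hs.drop f.toNat).head? = some c := singleton_prefix_iff_head.mp hpre
    have hflt : f.toNat < hs.length := by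
      by_contra hge2
      have : hs.drop f.toNat = [] := List.drop_eq_nil_of_le (by omega)
      rw [this] at hhead
      simp at hhead
    have hfc : hs[f.toNat] = c := by
      have := hhead
      rw [List.head?_drop] at this
      rwa [List.getElem?_eq_getElem hflt, Option.some_inj] at this
    -- f.toNat ≤ m : minimality of findFrom against the occurrence at m
    have hfm : f.toNat ≤ m := by
      by_contra hgt
      have hocc : [c] <+: hs.drop m := by
        rw [singleton_prefix_iff_head, List.head?_drop]
        rw [List.getElem?_eq_getElem hm, hcm]
      exact hmin m hkm (by omega) hocc
    -- m ≤ f.toNat : f.toNat is itself a position of c with index ≥ k, so it sits at or after slot r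
    have hmf : m ≤ f.toNat := by
      have hmemf : ((f.toNat : ℕ) : Int) ∈ lst := mem_posList.mpr ⟨f.toNat, hflt, rfl, hfc⟩
      obtain ⟨j, hj, hlj⟩ := List.mem_iff_getElem.mp hmemf
      rcases Nat.lt_or_ge j r with hjr | hjr
      · have := hinv1 j hjr hj
        rw [hlj] at this
        omega
      · have := hmono r j hrlt hj hjr
        rw [hlj, hvm] at this
        exact_mod_cast this
    have hfeq : f = (m : Int) := by omega
    rw [List.getD_eq_getElem lst 0 hrlt, hfeq, hvm]

-- the two query loops agree, cursor by cursor
theorem loopB_eq_loopA (hs : List Char) (q : List Char) :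
    ∀ (k : ℕ), k ≤ hs.length →
    loopB_matches (buildIndex hs) q (↑k) = loopA_matches hs q (↑k) := by
  induction q with
  | nil => intro k hk; rfl
  | cons c rest ih =>
    intro k hk
    simp only [loopB_matches, loopA_matches, buildIndex_get?]
    by_cases hemp : posList hs c = []
    · rw [if_pos hemp]
      -- no occurrence of c at all: bsearch on [] would return 0 = length; findFrom = -1
      have hneg : PySem.Chars.findFrom hs [c] (↑k) = -1 := by
        rw [PySem.Chars.findFrom_natCast_eq_neg_one_iff hs [c] k hk]
        intro hinf
        obtain ⟨i, hi, hci⟩ := List.mem_iff_getElem.mp (singleton_infix_iff_mem.mp hinf)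
        have hlen : k + i < hs.length := by
          have := hi; rw [List.length_drop] at this; omega
        have hget : hs[k + i] = c := by
          rw [← List.getElem_drop]; exact hci
        have : ((k + i : ℕ) : Int) ∈ posList hs c := mem_posList.mpr ⟨k + i, hlen, rfl, hget⟩
        rw [hemp] at this
        simp at this
      simp [hneg]
    · rw [if_neg hemp]
      obtain ⟨hfull, hlt⟩ := bsearch_eq_findFrom hs c k hk (posList hs c) rfl
      show (if bsearch (posList hs c) (↑k) 0 (posList hs c).length = (posList hs c).length then false
        else loopB_matches (buildIndex hs) rest
          ((posList hs c).getD (bsearch (posList hs c) (↑k) 0 (posList hs c).length) 0 + 1)) = _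
      by_cases hr : bsearch (posList hs c) (↑k) 0 (posList hs c).length = (posList hs c).length
      · rw [if_pos hr, hfull hr, if_pos rfl]
      · have hrlt : bsearch (posList hs c) (↑k) 0 (posList hs c).length < (posList hs c).length := by
          obtain ⟨hrle, _, _⟩ := bsearch_spec (posList hs c) (↑k)
            (fun i j hi hj hij => posList_mono hi hj hij) ((posList hs c).length - 0) 0
            ((posList hs c).length) rfl (Nat.zero_le _) (le_refl _) (by omega)
            (fun k hk hkl => absurd hkl (by omega))
          omega
        have hfeq := hlt hrlt
        -- the found value is a genuine position m < hs.length
        have hvmem : (posList hs c)[bsearch (posList hs c) (↑k) 0 (posList hs c).length] ∈ posList hs c :=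
          List.getElem_mem hrlt
        obtain ⟨m, hm, hvm, hcm⟩ := mem_posList.mp hvmem
        have hvr : (posList hs c).getD (bsearch (posList hs c) (↑k) 0 (posList hs c).length) 0 = (m : Int) := by
          rw [List.getD_eq_getElem (posList hs c) 0 hrlt, hvm]
        rw [if_neg hr, hfeq, hvr, if_neg (show ((m : ℕ) : Int) ≠ -1 by omega)]
        have hnext : ((m : ℕ) : Int) + 1 = ((m + 1 : ℕ) : Int) := by push_cast; ring
        rw [hnext]
        exact ih (m + 1) (by omega)

-- ===== VERDICT (by name: the statement is the Claim_ definition above) =====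
theorem matches_command_query_py_spec : Claim_equal_matches_command_query_py := by
  intro query haystack _
  unfold Spec_matches_command_query_py matches_command_query_py matches_command_query_py_alt
  have hB0 : loopB_matches (buildIndex haystack.toList) query.toList 0
      = loopA_matches haystack.toList query.toList 0 := by
    have := loopB_eq_loopA haystack.toList query.toList 0 (Nat.zero_le _)
    simpa using this
  by_cases hin : PySem.Str.isIn query haystack = true
  · have hinf : query.toList <:+: haystack.toList := (PySem.Str.isIn_iff_infix _ _).mp hin
    rw [if_pos hin, hB0, eq_comm]
    have hA : loopA_matches haystack.toList query.toList 0
        = consume_matches query.toList haystack.toList := by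
      simpa using loopA_eq_consume haystack.toList query.toList 0 (Nat.zero_le _)
    rw [hA]
    exact consume_of_sublist hinf.sublist
  · rw [if_neg hin, hB0]
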